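-- pv_equiv track=rewrite | github.com/AndrinirinaSafidyFitiavanaGabriella/Info-L1-MI | Exo1.py | canonical_first_forms
-- ===== SOURCE A (Python) =====
-- def canonical_first_forms(input_values):
--     a, b, c = "", "", ""
--     resultat, resultatfinal = "", ""
--     x = 0
--
--     for v in input_values:
--         if x == 0 :
--             a = "(A" if (v == 1)  else "(!A"
--             x += 1
--         elif x == 1 :
--             b = "B" if (v == 1) else "!B"
--             x += 1
--         elif x == 2 :
--             c = "C) " if (v == 1) else "!C)"
--         #resultat = [a, b, c]
--     resultat += a + " " + b + " " + c
--     return resultat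
-- ===== SOURCE B (Python) =====
-- def canonical_first_forms(input_values):
--     vals = list(input_values)
--     a = b = c = ""
--     if len(vals) >= 1:
--         a = "(A" if vals[0] == 1 else "(!A"
--     if len(vals) >= 2:
--         b = "B" if vals[1] == 1 else "!B"
--     if len(vals) >= 3:
--         # the loop in the original keeps overwriting c, so the last value decides it
--         c = "C) " if vals[-1] == 1 else "!C)"
--     return a + " " + b + " " + c
-- ===== Notes on version B (the rewrite author's own statement) =====
-- stated objective: simpler
-- what changed: Replaced the running-counter dispatch loop over the whole list with three guarded positional assignments (first, second, and last element), eliminating the loop entirely.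
import Mathlib
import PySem

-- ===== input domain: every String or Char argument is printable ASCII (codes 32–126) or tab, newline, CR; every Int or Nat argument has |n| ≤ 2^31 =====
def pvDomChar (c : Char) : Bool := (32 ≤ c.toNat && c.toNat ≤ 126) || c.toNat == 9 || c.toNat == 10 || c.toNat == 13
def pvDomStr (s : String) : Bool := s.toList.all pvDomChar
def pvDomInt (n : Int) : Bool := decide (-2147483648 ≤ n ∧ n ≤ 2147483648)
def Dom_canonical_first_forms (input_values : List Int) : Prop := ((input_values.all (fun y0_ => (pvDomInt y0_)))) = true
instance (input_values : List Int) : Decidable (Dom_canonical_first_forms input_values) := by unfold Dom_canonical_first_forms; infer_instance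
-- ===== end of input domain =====

-- B replaces A's running-counter dispatch loop with three guarded positional assignments (simpler; same values).

-- ===== PORT A =====
-- one step of A's for-loop: state is (a, b, c, x)
def cffStep (st : String × String × String × Int) (v : Int) : String × String × String × Int :=
  let (a, b, c, x) := st
  if x = 0 then (if v = 1 then "(A" else "(!A", b, c, x + 1)
  else if x = 1 then (a, if v = 1 then "B" else "!B", c, x + 1)
  else if x = 2 then (a, b, if v = 1 then "C) " else "!C)", x)
  else st

def canonical_first_forms (input_values : List Int) : String :=
  let st := input_values.foldl cffStep ("", "", "", 0)
  "" ++ st.1 ++ " " ++ st.2.1 ++ " " ++ st.2.2.1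

-- ===== PORT B =====
def canonical_first_forms_alt (input_values : List Int) : String :=
  let a := if input_values.length ≥ 1 then
             (if input_values.getD 0 0 = 1 then "(A" else "(!A") else ""
  let b := if input_values.length ≥ 2 then
             (if input_values.getD 1 0 = 1 then "B" else "!B") else ""
  let c := if input_values.length ≥ 3 then
             (if input_values.getLastD 0 = 1 then "C) " else "!C)") else ""
  a ++ " " ++ b ++ " " ++ c

-- ===== PRECONDITION & SPEC =====
def Spec_canonical_first_forms (input_values : List Int) (out : String) : Prop := out = canonical_first_forms_alt input_values
instance (input_values : List Int) (out : String) : Decidable (Spec_canonical_first_forms input_values out) := by unfold Spec_canonical_first_forms; infer_instance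

-- ===== CLAIM (what is proved, stated in full; the proofs are below) =====
def Claim_equal_canonical_first_forms : Prop := ∀ (input_values : List Int), Dom_canonical_first_forms input_values → Spec_canonical_first_forms input_values (canonical_first_forms input_values)

-- ===== LEMMAS AND PROOFS =====
theorem cffStep_zero (a b c : String) (v : Int) :
    cffStep (a, b, c, 0) v = (if v = 1 then "(A" else "(!A", b, c, 1) := by
  simp [cffStep]
theorem cffStep_one (a b c : String) (v : Int) :
    cffStep (a, b, c, 1) v = (a, if v = 1 then "B" else "!B", c, 2) := by
  simp [cffStep]
theorem cffStep_two (a b c : String) (v : Int) :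
    cffStep (a, b, c, 2) v = (a, b, if v = 1 then "C) " else "!C)", 2) := by
  simp [cffStep]

-- once x = 2, the fold only rewrites c, and the last element decides it
theorem cff_fold_two (rest : List Int) (a b c : String) :
    List.foldl cffStep (a, b, c, 2) rest
      = (a, b, if rest.length ≥ 1 then (if rest.getLastD 0 = 1 then "C) " else "!C)") else c, 2) := by
  induction rest generalizing c with
  | nil => simp
  | cons v t ih =>
    rw [List.foldl_cons, cffStep_two, ih]
    cases t with
    | nil => simp
    | cons w u => simp

-- ===== VERDICT (by name: the statement is the Claim_ definition above) =====
theorem canonical_first_forms_spec : Claim_equal_canonical_first_forms := by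
  intro l _
  unfold Spec_canonical_first_forms canonical_first_forms canonical_first_forms_alt
  match l with
  | [] => decide
  | [v] =>
    rw [List.foldl_cons, cffStep_zero, List.foldl_nil]
    norm_num [List.getD]
  | [v, w] =>
    rw [List.foldl_cons, cffStep_zero, List.foldl_cons, cffStep_one, List.foldl_nil]
    norm_num [List.getD]
  | v :: w :: u :: t =>
    rw [List.foldl_cons, cffStep_zero, List.foldl_cons, cffStep_one, List.foldl_cons,
        cffStep_two, cff_fold_two]
    cases t with
    | nil => norm_num [List.getD]
    | cons y s =>
      norm_num [List.getD, List.getLastD_eq_getLast?, List.getLast?_cons_cons]
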